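-- pv_equiv track=rewrite | github.com/danihazan/Solving-Sokoban-using-Formal-Verification | models/grid based model/solve_iteratively.py | extract_lines_between_states
-- ===== SOURCE A (Python) =====
-- def extract_lines_between_states(nuXmv_output):
--     """
--     This function processes a string output from the nuXmv model checker,
--     extracting and yielding lists of lines that occur between "State" markers.
--
--     Input:
--         A single string (nuXmv_output) containing the output from nuXmv,
--         with each line separated by a newline character (\n).
--
--     Output:
--         A generator that yields lists of lines found between occurrences of lines containing the word "State".
--         Each yielded list represents the lines between consecutive "State" markers in the input.
--
--     """
--
--     lines_between = []
--     is_between_states = False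
--
--     for output_line in nuXmv_output.split('\n'):
--         if 'State' in output_line:
--             if not is_between_states:
--                 lines_between = []
--                 is_between_states = True
--             else:
--                 yield lines_between
--                 lines_between = []
--         elif is_between_states:
--             lines_between.append(output_line)
--
--     if is_between_states:
--         yield lines_between
-- ===== SOURCE B (Python) =====
-- def extract_lines_between_states(nuXmv_output):
--     # Reverse scan: every 'State' line closes the group that follows it in the
--     # original order; lines before the first 'State' are discarded implicitly.
--     groups = []
--     group = []
--     for line in reversed(nuXmv_output.split('\n')):
--         if 'State' in line:
--             groups.append(group)
--             group = []
--         else: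
--             group = [line] + group
--     groups.reverse()
--     yield from groups
-- ===== Notes on version B (the rewrite author's own statement) =====
-- stated objective: alternative
-- what changed: B traverses the lines in reverse, closing one group per 'State' marker and discarding the pre-first-marker prefix implicitly, instead of A's forward scan with an is_between_states flag; both stay generators.
import Mathlib
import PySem

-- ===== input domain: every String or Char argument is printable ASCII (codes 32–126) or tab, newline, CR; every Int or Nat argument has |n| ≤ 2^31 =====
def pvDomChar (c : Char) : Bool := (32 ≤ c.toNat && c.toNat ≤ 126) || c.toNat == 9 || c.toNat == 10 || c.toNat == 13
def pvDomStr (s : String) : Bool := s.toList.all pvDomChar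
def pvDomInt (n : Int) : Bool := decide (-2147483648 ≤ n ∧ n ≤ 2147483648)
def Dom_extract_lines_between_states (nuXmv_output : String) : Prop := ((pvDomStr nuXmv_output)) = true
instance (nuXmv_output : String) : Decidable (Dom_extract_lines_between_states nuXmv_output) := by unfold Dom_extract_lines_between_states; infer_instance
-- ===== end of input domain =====

-- B re-implements A's forward flag-driven scan as a reverse scan that closes one group
-- per 'State' marker (objective: alternative decomposition, same O(n) cost).
-- Both Pythons are generators; equivalence is about the fully-consumed sequence of yields.

-- ===== PORT A =====
-- one loop iteration of A: state = (lines_between, is_between_states, yielded so far)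
def pvStepA (st : List String × Bool × List (List String)) (output_line : String) :
    List String × Bool × List (List String) :=
  if PySem.Str.isIn "State" output_line then
    if !st.2.1 then ([], true, st.2.2)
    else ([], true, st.2.2 ++ [st.1])
  else if st.2.1 then (st.1 ++ [output_line], st.2.1, st.2.2)
  else st

-- the trailing 'if is_between_states: yield lines_between'
def pvFinA (st : List String × Bool × List (List String)) : List (List String) :=
  if st.2.1 then st.2.2 ++ [st.1] else st.2.2

def extract_lines_between_states (nuXmv_output : String) : List (List String) :=
  pvFinA (((PySem.Str.split? nuXmv_output "\n").getD []).foldl pvStepA ([], false, []))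

-- ===== PORT B =====
-- one loop iteration of B: state = (groups, group)
def pvStepB (st : List (List String) × List String) (line : String) :
    List (List String) × List String :=
  if PySem.Str.isIn "State" line then (st.1 ++ [st.2], [])
  else (st.1, line :: st.2)

def extract_lines_between_states_alt (nuXmv_output : String) : List (List String) :=
  ((((PySem.Str.split? nuXmv_output "\n").getD []).reverse.foldl pvStepB ([], [])).1).reverse

-- ===== PRECONDITION & SPEC =====
def Spec_extract_lines_between_states (nuXmv_output : String) (out : List (List String)) : Prop := out = extract_lines_between_states_alt nuXmv_output
instance (nuXmv_output : String) (out : List (List String)) : Decidable (Spec_extract_lines_between_states nuXmv_output out) := by unfold Spec_extract_lines_between_states; infer_instance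

-- ===== CLAIM (what is proved, stated in full; the proofs are below) =====
def Claim_equal_extract_lines_between_states : Prop := ∀ (nuXmv_output : String), Dom_extract_lines_between_states nuXmv_output → Spec_extract_lines_between_states nuXmv_output (extract_lines_between_states nuXmv_output)

-- ===== LEMMAS AND PROOFS =====

-- groups of xs assuming a marker sits immediately before xs (first group still open)
def pvG : List String → List (List String)
  | [] => [[]]
  | x :: xs =>
    if PySem.Str.isIn "State" x then [] :: pvG xs
    else (pvG xs).modifyHead (x :: ·)

-- groups of xs starting only after the first marker
def pvF : List String → List (List String)
  | [] => []
  | x :: xs => if PySem.Str.isIn "State" x then pvG xs else pvF xs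

theorem pvG_ne_nil (xs : List String) : pvG xs ≠ [] := by
  induction xs with
  | nil => simp [pvG]
  | cons x xs ih =>
    simp only [pvG]
    split
    · simp
    · cases h : pvG xs with
      | nil => exact absurd h ih
      | cons a t => simp

theorem pvF_eq_tail (xs : List String) : pvF xs = (pvG xs).tail := by
  induction xs with
  | nil => simp [pvF, pvG]
  | cons x xs ih =>
    simp only [pvF, pvG]
    split
    · simp
    · rw [ih]
      cases h : pvG xs with
      | nil => exact absurd h (pvG_ne_nil xs)
      | cons a t => simp

theorem foldA_true (xs : List String) (a : List String) (out : List (List String)) :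
    pvFinA (xs.foldl pvStepA (a, true, out)) = out ++ (pvG xs).modifyHead (a ++ ·) := by
  induction xs generalizing a out with
  | nil => simp [pvFinA, pvG]
  | cons x xs ih =>
    rw [List.foldl_cons]
    by_cases h : PySem.Chars.isIn ['S','t','a','t','e'] x.toList = true
    · rw [show pvStepA (a, true, out) x = ([], true, out ++ [a]) by
        simp [pvStepA, h]]
      rw [ih]
      cases hg : pvG xs with
      | nil => exact absurd hg (pvG_ne_nil xs)
      | cons g t => simp [pvG, h, hg]
    · rw [show pvStepA (a, true, out) x = (a ++ [x], true, out) by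
        simp [pvStepA, h]]
      rw [ih]
      cases hg : pvG xs with
      | nil => exact absurd hg (pvG_ne_nil xs)
      | cons g t => simp [pvG, h, hg]

theorem foldA_false (xs : List String) (a : List String) (out : List (List String)) :
    pvFinA (xs.foldl pvStepA (a, false, out)) = out ++ pvF xs := by
  induction xs generalizing a with
  | nil => simp [pvFinA, pvF]
  | cons x xs ih =>
    rw [List.foldl_cons]
    by_cases h : PySem.Chars.isIn ['S','t','a','t','e'] x.toList = true
    · rw [show pvStepA (a, false, out) x = ([], true, out) by
        simp [pvStepA, h]]
      rw [foldA_true]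
      cases hg : pvG xs with
      | nil => exact absurd hg (pvG_ne_nil xs)
      | cons g t => simp [pvF, h, hg]
    · rw [show pvStepA (a, false, out) x = (a, false, out) by
        simp [pvStepA, h]]
      rw [ih, show pvF (x :: xs) = pvF xs by simp [pvF, h]]

theorem foldB (xs : List String) :
    xs.foldr (fun x st => pvStepB st x) ([], []) = ((pvF xs).reverse, (pvG xs).headI) := by
  induction xs with
  | nil => simp [pvF, pvG]
  | cons x xs ih =>
    rw [List.foldr_cons, ih]
    by_cases h : PySem.Chars.isIn ['S','t','a','t','e'] x.toList = true
    · rw [show pvStepB ((pvF xs).reverse, (pvG xs).headI) x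
          = ((pvF xs).reverse ++ [(pvG xs).headI], []) by simp [pvStepB, h]]
      rw [pvF_eq_tail]
      cases hg : pvG xs with
      | nil => exact absurd hg (pvG_ne_nil xs)
      | cons g t => simp [pvF, pvG, h, hg]
    · rw [show pvStepB ((pvF xs).reverse, (pvG xs).headI) x
          = ((pvF xs).reverse, x :: (pvG xs).headI) by simp [pvStepB, h]]
      cases hg : pvG xs with
      | nil => exact absurd hg (pvG_ne_nil xs)
      | cons g t => simp [pvF, pvG, h, hg]

theorem both_eq_pvF (s : String) :
    extract_lines_between_states s = extract_lines_between_states_alt s := by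
  unfold extract_lines_between_states extract_lines_between_states_alt
  rw [List.foldl_reverse, foldB, foldA_false]
  simp

-- ===== VERDICT (by name: the statement is the Claim_ definition above) =====
theorem extract_lines_between_states_spec : Claim_equal_extract_lines_between_states := by
  intro s _
  unfold Spec_extract_lines_between_states
  exact both_eq_pvF s
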